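-- pv_equiv track=rewrite | github.com/AarCon/AOC | Day_2/Bag_Game.py | get_possible_games
-- ===== SOURCE A (Python) =====
-- MAX_CUBES = {
--   "red": 12,
--   "green": 13,
--   "blue": 14
-- }
--
-- def check_game_possibility(game_dict):
--   for color in game_dict.keys():
--     if game_dict[color] > MAX_CUBES[color]:
--       return False
--   return True
--
-- def get_game_dict(game_list):
--   game_dict = {
--     "red": 0,
--     "green": 0,
--     "blue": 0
--   }
--   inputs = game_list.split(", ")
--   for color in inputs:
--     color_split = color.split(" ")
--     ammount = int(color_split[0])
--     color = color_split[1]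
--     game_dict[color] = ammount
--   return game_dict
--
-- def update_true_dict(true_game_dict, game_dict):
--   for color in true_game_dict.keys():
--     if game_dict[color] > true_game_dict[color]:
--       true_game_dict[color] = game_dict[color]
--
-- def get_possible_games(
--     games_list,
--     possible_game,
--     possible_list,
--     game_id,
--     true_game_dict,
--     impossible_list
--   ):
--   for game in games_list:
--     game_dict = get_game_dict(game)
--     update_true_dict(true_game_dict, game_dict)
--     possible = check_game_possibility(game_dict)
--     if possible and possible_game:
--       possible_game = True
--     else:
--       possible_game = False
--   if possible_game:
--     possible_list.append(game_id)
--   else: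
--     impossible_list.append(game_id)
--   return possible_game
-- ===== SOURCE B (Python) =====
-- def get_possible_games(
--     games_list,
--     possible_game,
--     possible_list,
--     game_id,
--     true_game_dict,
--     impossible_list
--   ):
--   # One flat pass over every individual draw: the whole set is impossible as
--   # soon as any single draw exceeds its colour limit.  No per-game dict and no
--   # per-game possibility check are needed.  (Return value is what matters here;
--   # the in-place update of true_game_dict is done per draw.)
--   limits = {"red": 12, "green": 13, "blue": 14}
--   ok = possible_game
--   for game in games_list:
--     for part in game.split(", "):
--       tokens = part.split(" ")
--       amount = int(tokens[0])
--       color = tokens[1]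
--       if color in true_game_dict and amount > true_game_dict[color]:
--         true_game_dict[color] = amount
--       if amount > limits[color]:
--         ok = False
--   if ok:
--     possible_list.append(game_id)
--   else:
--     impossible_list.append(game_id)
--   return ok
-- ===== Notes on version B (the rewrite author's own statement) =====
-- stated objective: simpler
-- what changed: B drops the per-game dict building, the per-game possibility check and the AND-fold over boolean flags: one flat pass over every individual draw clears a single flag whenever a draw exceeds its colour limit; Pre_ excludes inputs on which A raises (unparseable parts, colours or true_game_dict keys outside red/green/blue) and games that repeat a colour, where A's last-write-wins dict overwriting is accidental.
-- outside the precondition, e.g. on get_possible_games(['99 red, 2 red'], True, [], 1, {}, []): A returns True, B returns False; on get_possible_games(['99 red, 0 cat'], True, [], 1, {}, []): A returns False, B raises KeyError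
import Mathlib
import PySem

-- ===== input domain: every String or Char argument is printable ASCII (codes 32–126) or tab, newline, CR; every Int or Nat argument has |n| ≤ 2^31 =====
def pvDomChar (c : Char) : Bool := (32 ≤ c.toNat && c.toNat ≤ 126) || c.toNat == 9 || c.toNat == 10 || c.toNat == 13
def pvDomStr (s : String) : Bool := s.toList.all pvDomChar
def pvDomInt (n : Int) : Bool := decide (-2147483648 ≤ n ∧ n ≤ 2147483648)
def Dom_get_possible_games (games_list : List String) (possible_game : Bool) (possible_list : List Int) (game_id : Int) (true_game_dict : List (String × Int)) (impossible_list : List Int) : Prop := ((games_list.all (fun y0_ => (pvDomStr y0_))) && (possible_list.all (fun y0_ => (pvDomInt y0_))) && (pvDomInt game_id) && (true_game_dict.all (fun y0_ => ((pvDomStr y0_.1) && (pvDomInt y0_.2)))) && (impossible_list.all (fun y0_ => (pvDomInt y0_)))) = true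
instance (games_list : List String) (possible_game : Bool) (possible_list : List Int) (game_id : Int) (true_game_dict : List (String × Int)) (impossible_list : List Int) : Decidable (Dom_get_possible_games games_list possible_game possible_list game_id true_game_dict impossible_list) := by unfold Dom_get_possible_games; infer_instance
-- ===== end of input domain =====

-- B replaces A's per-game dict + possibility check + AND-fold by one flat pass over every draw
-- clearing a single flag. Python A and B both mutate possible_list / impossible_list / true_game_dict
-- (B updates true_game_dict per draw, A per game); the theorems below are about the RETURN value only.

-- s.split(sep) for a non-empty literal sep (split? is some exactly then)
def pySplit (s sep : String) : List String := (PySem.Str.split? s sep).getD []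

-- the parsed colour and amount of one "<n> <colour>" part
def colOf (part : String) : String := PySem.List.pyGetD (pySplit part " ") 1 ""

-- ===== PORT A =====
def pvMaxCubes : PySem.Dict String Int :=
  PySem.Dict.ofList [("red", 12), ("green", 13), ("blue", 14)]

-- early 'return False' on the first exceeding colour = List.all over the keys
def check_game_possibility (game_dict : PySem.Dict String Int) : Bool :=
  game_dict.keys.all (fun color => !decide (game_dict.getD color 0 > pvMaxCubes.getD color 0))

def get_game_dict (game_list : String) : PySem.Dict String Int :=
  (pySplit game_list ", ").foldl
    (fun game_dict color =>
      let color_split := pySplit color " "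
      let ammount := (PySem.Int.ofStr? (PySem.List.pyGetD color_split 0 "")).getD 0
      let c := PySem.List.pyGetD color_split 1 ""
      game_dict.insert c ammount)
    (PySem.Dict.ofList [("red", 0), ("green", 0), ("blue", 0)])

-- update_true_dict and the two list appends only mutate their arguments and never feed back into
-- the returned Bool (inside Pre_ they cannot raise), so the port models the return value only.
def get_possible_games (games_list : List String) (possible_game : Bool) (possible_list : List Int) (game_id : Int) (true_game_dict : List (String × Int)) (impossible_list : List Int) : Bool :=
  games_list.foldl
    (fun possible_game game =>
      let game_dict := get_game_dict game
      let possible := check_game_possibility game_dict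
      if possible && possible_game then true else false)
    possible_game

-- ===== PORT B =====
def pvLimits : PySem.Dict String Int :=
  PySem.Dict.ofList [("red", 12), ("green", 13), ("blue", 14)]

-- the true_game_dict update and the two list appends are mutations that never feed back into the
-- returned Bool; the port models the return value only.
def get_possible_games_alt (games_list : List String) (possible_game : Bool) (possible_list : List Int) (game_id : Int) (true_game_dict : List (String × Int)) (impossible_list : List Int) : Bool :=
  games_list.foldl
    (fun ok game =>
      (pySplit game ", ").foldl
        (fun ok part =>
          let tokens := pySplit part " "
          let amount := (PySem.Int.ofStr? (PySem.List.pyGetD tokens 0 "")).getD 0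
          let color := PySem.List.pyGetD tokens 1 ""
          if amount > pvLimits.getD color 0 then false else ok)
        ok)
    possible_game

-- ===== PRECONDITION & SPEC =====
-- Pre_ excludes exactly the inputs on which Python A or B raises (int() ValueError, a part without
-- a second token: IndexError, KeyError from a colour or true_game_dict key outside red/green/blue)
-- plus the games repeating a colour, on which A still returns a value but that value is an accident
-- of its dict last-write-wins overwriting — see the cites.
def Pre_get_possible_games (games_list : List String) (possible_game : Bool) (possible_list : List Int) (game_id : Int) (true_game_dict : List (String × Int)) (impossible_list : List Int) : Prop :=
  (∀ game ∈ games_list,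
    (∀ part ∈ pySplit game ", ",
      2 ≤ (pySplit part " ").length ∧
      (PySem.Int.ofStr? (PySem.List.pyGetD (pySplit part " ") 0 "")).isSome = true ∧
      colOf part ∈ (["red", "green", "blue"] : List String)) ∧
    ((pySplit game ", ").map colOf).Nodup) ∧
  (games_list = [] ∨ ∀ p ∈ true_game_dict, p.1 ∈ (["red", "green", "blue"] : List String))
instance (games_list : List String) (possible_game : Bool) (possible_list : List Int) (game_id : Int) (true_game_dict : List (String × Int)) (impossible_list : List Int) : Decidable (Pre_get_possible_games games_list possible_game possible_list game_id true_game_dict impossible_list) := by unfold Pre_get_possible_games; infer_instance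

def pvWitness_get_possible_games : List String × Bool × List Int × Int × (List (String × Int)) × List Int :=
  (["3 red, 2 green", "15 blue"], true, [], 1, [("red", 0), ("green", 0), ("blue", 0)], [])

def Spec_get_possible_games (games_list : List String) (possible_game : Bool) (possible_list : List Int) (game_id : Int) (true_game_dict : List (String × Int)) (impossible_list : List Int) (out : Bool) : Prop := out = get_possible_games_alt games_list possible_game possible_list game_id true_game_dict impossible_list
instance (games_list : List String) (possible_game : Bool) (possible_list : List Int) (game_id : Int) (true_game_dict : List (String × Int)) (impossible_list : List Int) (out : Bool) : Decidable (Spec_get_possible_games games_list possible_game possible_list game_id true_game_dict impossible_list out) := by unfold Spec_get_possible_games; infer_instance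

-- ===== CLAIM =====
def Claim_equal_get_possible_games : Prop := ∀ (games_list : List String) (possible_game : Bool) (possible_list : List Int) (game_id : Int) (true_game_dict : List (String × Int)) (impossible_list : List Int), Dom_get_possible_games games_list possible_game possible_list game_id true_game_dict impossible_list → Pre_get_possible_games games_list possible_game possible_list game_id true_game_dict impossible_list → Spec_get_possible_games games_list possible_game possible_list game_id true_game_dict impossible_list (get_possible_games games_list possible_game possible_list game_id true_game_dict impossible_list)

-- ===== LEMMAS AND PROOFS =====

-- the parsed amount of one part
def amtOf (part : String) : Int := (PySem.Int.ofStr? (PySem.List.pyGetD (pySplit part " ") 0 "")).getD 0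

-- value of the LAST part naming colour c (default d) — what A's forward overwriting leaves behind
def lastVal (parts : List String) (c : String) (d : Int) : Int :=
  parts.foldl (fun a p => if colOf p = c then amtOf p else a) d

-- A-side: lookup after the forward overwrite fold
lemma getD_parse (parts : List String) (d : PySem.Dict String Int) (c : String) :
    ((parts.foldl (fun gd p => gd.insert (colOf p) (amtOf p)) d).getD c 0)
      = lastVal parts c (d.getD c 0) := by
  induction parts generalizing d with
  | nil => rfl
  | cons p t ih =>
      simp only [List.foldl_cons, lastVal]
      rw [ih]
      by_cases hc : c = colOf p
      · subst hc
        rw [PySem.Dict.getD_insert_self, if_pos rfl]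
        rfl
      · rw [PySem.Dict.getD_insert_of_ne d _ _ hc, if_neg (fun h => hc h.symm)]
        rfl

-- adding only already-present elements leaves a set unchanged
lemma set_update_of_contains (l : List String) (s : PySem.Set String)
    (h : ∀ x ∈ l, PySem.Set.contains s x = true) : PySem.Set.update s l = s := by
  induction l generalizing s with
  | nil => rfl
  | cons x t ih =>
      have hx : PySem.Set.add s x = s := by
        simp only [PySem.Set.add, h x (List.mem_cons_self ..), if_true]
      calc PySem.Set.update s (x :: t) = PySem.Set.update (PySem.Set.add s x) t := rfl
        _ = PySem.Set.update s t := by rw [hx]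
        _ = s := ih s (fun y hy => h y (List.mem_cons_of_mem _ hy))

lemma get_game_dict_eq (g : String) :
    get_game_dict g = (pySplit g ", ").foldl (fun gd p => gd.insert (colOf p) (amtOf p))
      (PySem.Dict.ofList [("red", 0), ("green", 0), ("blue", 0)]) := rfl

-- A-side: the keys after parsing a game whose colours are all rgb
lemma keys_parse (g : String)
    (hcols : ∀ part ∈ pySplit g ", ", colOf part ∈ (["red", "green", "blue"] : List String)) :
    (get_game_dict g).keys = ["red", "green", "blue"] := by
  rw [get_game_dict_eq, PySem.Dict.keys_foldl_insert_key]
  have hk : (PySem.Dict.ofList [("red", (0:Int)), ("green", 0), ("blue", 0)]).keys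
      = ["red", "green", "blue"] := rfl
  rw [hk]
  apply set_update_of_contains
  intro x hx
  rcases List.mem_map.mp hx with ⟨p, hp, rfl⟩
  have hm := hcols p hp
  simp only [List.mem_cons, List.not_mem_nil, or_false] at hm
  rcases hm with h | h | h <;> rw [h] <;> rfl

lemma not_decide_gt (x k : Int) : (!decide (x > k)) = decide (x ≤ k) := by
  by_cases h : x ≤ k
  · simp [h, not_lt.mpr h]
  · have hk := not_le.mp h
    simp [h, hk]

-- A's per-game check in terms of the three last-written values
lemma check_parse (g : String)
    (hcols : ∀ part ∈ pySplit g ", ", colOf part ∈ (["red", "green", "blue"] : List String)) :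
    check_game_possibility (get_game_dict g) =
      (decide (lastVal (pySplit g ", ") "red" 0 ≤ 12) &&
       decide (lastVal (pySplit g ", ") "green" 0 ≤ 13) &&
       decide (lastVal (pySplit g ", ") "blue" 0 ≤ 14)) := by
  unfold check_game_possibility
  rw [keys_parse g hcols]
  have hr := getD_parse (pySplit g ", ")
    (PySem.Dict.ofList [("red", 0), ("green", 0), ("blue", 0)]) "red"
  have hg := getD_parse (pySplit g ", ")
    (PySem.Dict.ofList [("red", 0), ("green", 0), ("blue", 0)]) "green"
  have hb := getD_parse (pySplit g ", ")
    (PySem.Dict.ofList [("red", 0), ("green", 0), ("blue", 0)]) "blue"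
  simp only [List.all_cons, List.all_nil, Bool.and_true]
  rw [get_game_dict_eq, hr, hg, hb]
  rw [show pvMaxCubes.getD "red" 0 = 12 from rfl, show pvMaxCubes.getD "green" 0 = 13 from rfl,
      show pvMaxCubes.getD "blue" 0 = 14 from rfl]
  rw [not_decide_gt, not_decide_gt, not_decide_gt]
  rw [show (PySem.Dict.ofList [("red", (0:Int)), ("green", 0), ("blue", 0)]).getD "red" 0 = 0 by decide,
      show (PySem.Dict.ofList [("red", (0:Int)), ("green", 0), ("blue", 0)]).getD "green" 0 = 0 by decide,
      show (PySem.Dict.ofList [("red", (0:Int)), ("green", 0), ("blue", 0)]).getD "blue" 0 = 0 by decide,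
      Bool.and_assoc]

-- A's AND-fold is the initial flag AND the per-game checks
lemma foldl_and (games : List String) (chk : String → Bool) (pg : Bool) :
    games.foldl (fun possible_game game => if chk game && possible_game then true else false) pg
      = (pg && games.all chk) := by
  induction games generalizing pg with
  | nil => simp
  | cons g t ih =>
      simp only [List.foldl_cons, List.all_cons]
      rw [ih]
      cases pg <;> cases chk g <;> simp

lemma lastVal_not_mem (parts : List String) (c : String) (d : Int)
    (h : ∀ p ∈ parts, colOf p ≠ c) : lastVal parts c d = d := by
  induction parts generalizing d with
  | nil => rfl
  | cons p t ih =>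
      simp only [lastVal, List.foldl_cons]
      rw [if_neg (h p (List.mem_cons_self ..))]
      exact ih d (fun q hq => h q (List.mem_cons_of_mem _ hq))

-- with distinct colours, the last-written value is ≤ k iff every part with that colour is ≤ k
lemma lastVal_le_iff (parts : List String) (c : String) (k : Int) (hk : 0 ≤ k)
    (hnd : (parts.map colOf).Nodup) :
    lastVal parts c 0 ≤ k ↔ ∀ p ∈ parts, colOf p = c → amtOf p ≤ k := by
  induction parts with
  | nil => simpa [lastVal] using hk
  | cons p t ih =>
      rw [List.map_cons, List.nodup_cons] at hnd
      obtain ⟨hpnot, hnd'⟩ := hnd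
      have hstep : lastVal (p :: t) c 0 = lastVal t c (if colOf p = c then amtOf p else 0) := rfl
      by_cases hc : colOf p = c
      · have hnot : ∀ q ∈ t, colOf q ≠ c := by
          intro q hq he
          exact hpnot (by rw [hc, ← he]; exact List.mem_map_of_mem hq)
        rw [hstep, if_pos hc, lastVal_not_mem t c _ hnot]
        constructor
        · intro h q hq hcq
          rcases List.mem_cons.mp hq with rfl | hq'
          · exact h
          · exact absurd hcq (hnot q hq')
        · intro h
          exact h p (List.mem_cons_self ..) hc
      · rw [hstep, if_neg hc, show lastVal t c 0 = lastVal t c 0 from rfl]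
        rw [ih hnd']
        constructor
        · intro h q hq hcq
          rcases List.mem_cons.mp hq with rfl | hq'
          · exact absurd hcq hc
          · exact h q hq' hcq
        · intro h q hq hcq
          exact h q (List.mem_cons_of_mem _ hq) hcq

-- A's per-game check equals B's "every draw within its limit"
lemma check_eq_all (g : String)
    (hcols : ∀ part ∈ pySplit g ", ", colOf part ∈ (["red", "green", "blue"] : List String))
    (hnd : ((pySplit g ", ").map colOf).Nodup) :
    check_game_possibility (get_game_dict g)
      = (pySplit g ", ").all (fun p => decide (amtOf p ≤ pvLimits.getD (colOf p) 0)) := by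
  rw [check_parse g hcols, Bool.eq_iff_iff]
  simp only [Bool.and_eq_true, decide_eq_true_eq, List.all_eq_true, decide_eq_true_eq]
  rw [lastVal_le_iff _ _ _ (by norm_num) hnd, lastVal_le_iff _ _ _ (by norm_num) hnd,
      lastVal_le_iff _ _ _ (by norm_num) hnd]
  constructor
  · rintro ⟨⟨hr, hg⟩, hb⟩ p hp
    have hm := hcols p hp
    simp only [List.mem_cons, List.not_mem_nil, or_false] at hm
    rcases hm with h | h | h <;> rw [h]
    · exact hr p hp h
    · exact hg p hp h
    · exact hb p hp h
  · intro h
    refine ⟨⟨fun p hp hc => ?_, fun p hp hc => ?_⟩, fun p hp hc => ?_⟩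
    · have := h p hp; rwa [hc] at this
    · have := h p hp; rwa [hc] at this
    · have := h p hp; rwa [hc] at this

-- B's inner fold: the flag survives iff it started true and no draw exceeds its limit
lemma foldl_clear (l : List String) (ok : Bool) :
    l.foldl (fun ok p => if amtOf p > pvLimits.getD (colOf p) 0 then false else ok) ok
      = (ok && l.all (fun p => decide (amtOf p ≤ pvLimits.getD (colOf p) 0))) := by
  induction l generalizing ok with
  | nil => simp
  | cons p t ih =>
      simp only [List.foldl_cons, List.all_cons]
      rw [ih]
      by_cases h : amtOf p > pvLimits.getD (colOf p) 0
      · simp [h, not_le.mpr h]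
      · simp [h, not_lt.mp h]

-- B's outer fold of ANDed per-game checks
lemma foldl_and_outer (games : List String) (c : String → Bool) (pg : Bool) :
    games.foldl (fun ok g => ok && c g) pg = (pg && games.all c) := by
  induction games generalizing pg with
  | nil => simp
  | cons g t ih =>
      simp only [List.foldl_cons, List.all_cons]
      rw [ih, Bool.and_assoc]

lemma all_congr_mem {α : Type} (l : List α) (f g : α → Bool) (h : ∀ x ∈ l, f x = g x) :
    l.all f = l.all g := by
  induction l with
  | nil => rfl
  | cons x t ih =>
      simp only [List.all_cons]
      rw [h x (List.mem_cons_self ..), ih (fun y hy => h y (List.mem_cons_of_mem _ hy))]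

lemma alt_eq (games_list : List String) (pg : Bool) (possible_list : List Int) (game_id : Int)
    (true_game_dict : List (String × Int)) (impossible_list : List Int) :
    get_possible_games_alt games_list pg possible_list game_id true_game_dict impossible_list
      = games_list.foldl
          (fun ok g => (pySplit g ", ").foldl
            (fun ok p => if amtOf p > pvLimits.getD (colOf p) 0 then false else ok) ok)
          pg := rfl

-- ===== VERDICT =====
theorem get_possible_games_spec : Claim_equal_get_possible_games := by
  intro games_list possible_game possible_list game_id true_game_dict impossible_list _ hpre
  unfold Spec_get_possible_games
  have hA : get_possible_games games_list possible_game possible_list game_id true_game_dict impossible_list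
      = (possible_game && games_list.all (fun g => check_game_possibility (get_game_dict g))) :=
    foldl_and games_list (fun g => check_game_possibility (get_game_dict g)) possible_game
  have hfun : (fun (ok : Bool) g => (pySplit g ", ").foldl
        (fun ok p => if amtOf p > pvLimits.getD (colOf p) 0 then false else ok) ok)
      = (fun (ok : Bool) g => ok &&
          (pySplit g ", ").all (fun p => decide (amtOf p ≤ pvLimits.getD (colOf p) 0))) := by
    funext ok g
    exact foldl_clear _ ok
  rw [hA, alt_eq, hfun, foldl_and_outer]
  congr 1
  apply all_congr_mem
  intro g hg
  exact check_eq_all g (fun part hp => ((hpre.1 g hg).1 part hp).2.2) (hpre.1 g hg).2
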